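-- pv_equiv track=rewrite | github.com/mukunda1518/Data-Structures-Algorithms | sorting/max_sum_of_non_overlapping_subarrays.py | get_sum_of_right_sub_arrays
-- ===== SOURCE A (Python) =====
-- def get_sum_of_right_sub_arrays(nums, n, m):
--     right_array = [0] * n
--     sum_ = sum(nums[n - m:n])
--     right_array[n - m] = sum_
--     s, max_ = n - 1, sum_
--     for e in range(n - m - 1, -1, -1):
--         sum_ += nums[e] - nums[s]
--         max_ = max(max_, sum_)
--         right_array[e] = max_
--         s -= 1
--     return right_array
-- ===== SOURCE B (Python) =====
-- def get_sum_of_right_sub_arrays(nums, n, m):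
--     # prefix-sum table: each window sum is read directly, no sliding recurrence
--     prefix = [0]
--     for x in nums:
--         prefix.append(prefix[-1] + x)
--     out = [0] * n
--     out[n - m] = sum(nums[n - m:n])
--     # DP on the output array itself: out[e] = max(window sum at e, out[e+1])
--     for e in range(n - m - 1, -1, -1):
--         out[e] = max(prefix[e + m] - prefix[e], out[e + 1])
--     return out
-- ===== Notes on version B (the rewrite author's own statement) =====
-- stated objective: alternative
-- what changed: A's incremental sliding-window sum (sum_ += nums[e]-nums[s] with a trailing pointer s) and its running-max accumulator are both removed: B builds a prefix-sum table once, reads each window sum as prefix[e+m]-prefix[e], and fills the answer by the DP recurrence out[e] = max(window sum, out[e+1]) on the output array itself.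
import Mathlib
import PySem

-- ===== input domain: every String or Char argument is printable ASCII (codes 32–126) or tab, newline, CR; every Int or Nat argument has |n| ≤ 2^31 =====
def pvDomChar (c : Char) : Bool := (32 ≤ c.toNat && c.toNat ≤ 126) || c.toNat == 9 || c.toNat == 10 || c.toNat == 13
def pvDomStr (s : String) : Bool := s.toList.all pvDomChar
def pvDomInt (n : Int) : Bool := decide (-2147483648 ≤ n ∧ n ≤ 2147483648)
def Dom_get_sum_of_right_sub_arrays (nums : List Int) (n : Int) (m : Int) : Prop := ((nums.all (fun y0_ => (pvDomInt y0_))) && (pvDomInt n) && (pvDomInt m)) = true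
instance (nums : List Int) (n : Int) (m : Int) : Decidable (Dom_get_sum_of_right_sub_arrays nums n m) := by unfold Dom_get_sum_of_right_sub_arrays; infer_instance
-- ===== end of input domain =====

-- B removes A's incremental sliding-window sum (trailing pointer s, running sum_ and max_ accumulators)
-- and instead builds a prefix-sum table, reads each window sum as prefix[e+m]-prefix[e], and fills the
-- answer by the DP recurrence out[e] = max(window sum, out[e+1]) on the output array (objective: alternative).

-- ===== PORT A =====
-- one iteration of A's for-loop; state = (right_array, sum_, s, max_)
def stepA (nums : List Int) (st : List Int × Int × Int × Int) (e : Int) : List Int × Int × Int × Int :=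
  let sum' := st.2.1 + PySem.List.pyGetD nums e 0 - PySem.List.pyGetD nums st.2.2.1 0
  let max' := max st.2.2.2 sum'
  (PySem.List.pySetD st.1 e max', sum', st.2.2.1 - 1, max')

def get_sum_of_right_sub_arrays (nums : List Int) (n : Int) (m : Int) : List Int :=
  let right0 : List Int := List.replicate n.toNat 0                        -- [0] * n
  let sum0 : Int := (PySem.List.slice nums (some (n - m)) (some n)).sum    -- sum(nums[n-m:n])
  let right1 := PySem.List.pySetD right0 (n - m) sum0                      -- right_array[n-m] = sum_
  ((PySem.List.pyRange (n - m - 1) (-1) (-1)).foldl (stepA nums) (right1, sum0, n - 1, sum0)).1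

-- ===== PORT B =====
-- one iteration of B's for-loop over e; state = the out array
def stepB (pfx : List Int) (m : Int) (r : List Int) (e : Int) : List Int :=
  PySem.List.pySetD r e
    (max (PySem.List.pyGetD pfx (e + m) 0 - PySem.List.pyGetD pfx e 0) (PySem.List.pyGetD r (e + 1) 0))

def get_sum_of_right_sub_arrays_alt (nums : List Int) (n : Int) (m : Int) : List Int :=
  let pfx := nums.foldl (fun p x => p ++ [PySem.List.pyGetD p (-1) 0 + x]) [0]   -- prefix.append(prefix[-1] + x)
  let out0 : List Int := List.replicate n.toNat 0                                -- [0] * n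
  let s0 : Int := (PySem.List.slice nums (some (n - m)) (some n)).sum            -- sum(nums[n-m:n])
  let out1 := PySem.List.pySetD out0 (n - m) s0                                  -- out[n-m] = s0
  (PySem.List.pyRange (n - m - 1) (-1) (-1)).foldl (stepB pfx m) out1

-- ===== PRECONDITION & SPEC =====
-- Pre_ is exactly the set of inputs on which the Python A returns normally (everywhere else A
-- raises an IndexError: n ≤ 0, m ≤ 0, m > 2n, or a window read past the end of nums).
def Pre_get_sum_of_right_sub_arrays (nums : List Int) (n : Int) (m : Int) : Prop :=
  1 ≤ n ∧ 1 ≤ m ∧ m ≤ 2 * n ∧ (n ≤ m ∨ n ≤ (nums.length : Int))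
instance (nums : List Int) (n : Int) (m : Int) : Decidable (Pre_get_sum_of_right_sub_arrays nums n m) := by
  unfold Pre_get_sum_of_right_sub_arrays; infer_instance

def pvWitness_get_sum_of_right_sub_arrays : List Int × Int × Int := ([1, -2, 3], 3, 2)

def Spec_get_sum_of_right_sub_arrays (nums : List Int) (n : Int) (m : Int) (out : List Int) : Prop := out = get_sum_of_right_sub_arrays_alt nums n m
instance (nums : List Int) (n : Int) (m : Int) (out : List Int) : Decidable (Spec_get_sum_of_right_sub_arrays nums n m out) := by unfold Spec_get_sum_of_right_sub_arrays; infer_instance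

-- ===== CLAIM (what is proved, stated in full; the proofs are below) =====
def Claim_equal_get_sum_of_right_sub_arrays : Prop := ∀ (nums : List Int) (n : Int) (m : Int), Dom_get_sum_of_right_sub_arrays nums n m → Pre_get_sum_of_right_sub_arrays nums n m → Spec_get_sum_of_right_sub_arrays nums n m (get_sum_of_right_sub_arrays nums n m)

-- ===== LEMMAS AND PROOFS =====

-- the sequence of max_-values A's loop writes, processing indices j-1, j-2, …, 0
def trace (nums : List Int) (m : Int) : Nat → Int → Int → List Int
  | 0, _, _ => []
  | j+1, w, mx =>
    let w' := w + nums.getD j 0 - nums.getD (j + m.toNat) 0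
    let mx' := max mx w'
    mx' :: trace nums m j w' mx'

-- the sequence of values B's loop writes, processing indices j-1, j-2, …, 0, b = out[j]
def traceB (pfx : List Int) (m : Int) : Nat → Int → List Int
  | 0, _ => []
  | j+1, b =>
    let v := max (PySem.List.pyGetD pfx ((j : Int) + m) 0 - PySem.List.pyGetD pfx (j : Int) 0) b
    v :: traceB pfx m j v

-- Python's prefix list built from running value a over the remaining elements
def prefList : List Int → Int → List Int
  | [], a => [a]
  | x :: xs, a => a :: prefList xs (a + x)

theorem foldl_prefList :
    ∀ (xs p : List Int) (a : Int),
    xs.foldl (fun p x => p ++ [PySem.List.pyGetD p (-1) 0 + x]) (p ++ [a]) = p ++ prefList xs a := by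
  intro xs
  induction xs with
  | nil => intro p a; simp [prefList]
  | cons x xs ih =>
    intro p a
    rw [List.foldl_cons]
    simp only [PySem.List.pyGetD_neg_one_append_singleton]
    rw [ih (p ++ [a]) (a + x)]
    simp [prefList]

theorem prefList_getD (xs : List Int) : ∀ (i : Nat) (a : Int), i ≤ xs.length →
    (prefList xs a).getD i 0 = a + (xs.take i).sum := by
  induction xs with
  | nil =>
    intro i a hi
    have h0 : i = 0 := by simpa using hi
    subst h0
    simp [prefList]
  | cons x xs ih =>
    intro i a hi
    cases i with
    | zero => simp [prefList]
    | succ i =>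
      simp only [prefList, List.getD_cons_succ, List.take_succ_cons, List.sum_cons]
      rw [ih i (a + x) (by simpa using hi)]
      ring

theorem take_succ_sum (xs : List Int) (i : Nat) (hi : i < xs.length) :
    (xs.take (i + 1)).sum = (xs.take i).sum + xs.getD i 0 := by
  rw [List.sum_take_succ _ _ hi]
  simp [List.getD_eq_getElem?_getD, List.getElem?_eq_getElem hi]

theorem trace_eq_traceB (nums : List Int) (m : Int) (hm : 0 ≤ m) :
    ∀ (j : Nat) (mx : Int), j + m.toNat ≤ nums.length →
    trace nums m j ((nums.take (j + m.toNat)).sum - (nums.take j).sum) mx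
      = traceB (prefList nums 0) m j mx := by
  intro j
  induction j with
  | zero => intro mx _; rfl
  | succ j ih =>
    intro mx hj
    have hjm : j + m.toNat < nums.length := by omega
    have hjl : j < nums.length := by omega
    have hw : (nums.take (j + 1 + m.toNat)).sum - (nums.take (j + 1)).sum
        + nums.getD j 0 - nums.getD (j + m.toNat) 0
        = (nums.take (j + m.toNat)).sum - (nums.take j).sum := by
      have h1 := take_succ_sum nums (j + m.toNat) hjm
      have h2 := take_succ_sum nums j hjl
      have he : j + 1 + m.toNat = (j + m.toNat) + 1 := by omega
      rw [he, h1, h2]; ring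
    have hcast : (j : Int) + m = ((j + m.toNat : Nat) : Int) := by push_cast; omega
    simp only [trace, traceB, hw, hcast, PySem.List.pyGetD_natCast]
    rw [prefList_getD nums (j + m.toNat) 0 (by omega), prefList_getD nums j 0 (by omega)]
    simp only [zero_add,
      max_comm ((nums.take (j + m.toNat)).sum - (nums.take j).sum) mx, List.cons.injEq]
    exact ⟨trivial, ih _ (by omega)⟩

theorem foldl_stepA (nums : List Int) (m : Int) (hm : 0 ≤ m) :
    ∀ (j : Nat) (r : List Int) (w mx : Int), j ≤ r.length →
    ((PySem.List.pyRange ((j : Int) - 1) (-1) (-1)).foldl (stepA nums) (r, w, (j : Int) + m - 1, mx)).1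
      = (trace nums m j w mx).reverse ++ r.drop j := by
  intro j
  induction j with
  | zero =>
    intro r w mx _
    rw [PySem.List.pyRange_neg_one_eq_nil (by omega)]
    simp [trace]
  | succ j ih =>
    intro r w mx hr
    have hcons : PySem.List.pyRange (((j : Nat) + 1 : Int) - 1) (-1) (-1)
        = (j : Int) :: PySem.List.pyRange ((j : Int) - 1) (-1) (-1) := by
      have := PySem.List.pyRange_neg_one_cons (a := ((j : Nat) + 1 : Int) - 1) (b := (-1 : Int)) (by omega)
      simpa using this
    push_cast
    rw [hcons, List.foldl_cons]
    have hjm : (j : Int) + 1 + m - 1 = ((j + m.toNat : Nat) : Int) := by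
      push_cast; omega
    simp only [stepA, hjm, PySem.List.pyGetD_natCast, PySem.List.pySetD_natCast]
    have h3 : ((j + m.toNat : Nat) : Int) - 1 = (j : Int) + m - 1 := by push_cast; omega
    rw [h3, ih _ _ _ (by simp; omega)]
    have hlt : j < (r.set j (max mx (w + nums.getD j 0 - nums.getD (j + m.toNat) 0))).length := by
      simp; omega
    rw [List.drop_eq_getElem_cons hlt, List.getElem_set_self hlt,
      List.drop_set_of_lt (by omega : j < j + 1)]
    simp [trace, List.getD_eq_getElem?_getD]

theorem foldl_stepB (pfx : List Int) (m : Int) :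
    ∀ (j : Nat) (r : List Int) (b : Int), j < r.length → PySem.List.pyGetD r (j : Int) 0 = b →
    (PySem.List.pyRange ((j : Int) - 1) (-1) (-1)).foldl (stepB pfx m) r
      = (traceB pfx m j b).reverse ++ r.drop j := by
  intro j
  induction j with
  | zero =>
    intro r b _ _
    rw [PySem.List.pyRange_neg_one_eq_nil (by omega)]
    simp [traceB]
  | succ j ih =>
    intro r b hr hb
    have hcons : PySem.List.pyRange (((j : Nat) + 1 : Int) - 1) (-1) (-1)
        = (j : Int) :: PySem.List.pyRange ((j : Int) - 1) (-1) (-1) := by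
      have := PySem.List.pyRange_neg_one_cons (a := ((j : Nat) + 1 : Int) - 1) (b := (-1 : Int)) (by omega)
      simpa using this
    push_cast
    rw [hcons, List.foldl_cons]
    have hb' : PySem.List.pyGetD r ((j : Int) + 1) 0 = b := by
      have : (j : Int) + 1 = ((j + 1 : Nat) : Int) := by push_cast; ring
      rw [this]; exact_mod_cast hb
    simp only [stepB, hb', PySem.List.pySetD_natCast]
    set v := max (PySem.List.pyGetD pfx ((j : Int) + m) 0 - PySem.List.pyGetD pfx (j : Int) 0) b with hv
    rw [ih (r.set j v) v (by simp; omega)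
      (by simp only [PySem.List.pyGetD_natCast]
          simp [List.getD_eq_getElem?_getD, List.getElem?_set_self (by omega : j < r.length)])]
    have hlt : j < (r.set j v).length := by simp; omega
    rw [List.drop_eq_getElem_cons hlt, List.getElem_set_self hlt,
      List.drop_set_of_lt (by omega : j < j + 1)]
    simp only [traceB, ← hv, List.reverse_cons, List.append_assoc, List.cons_append,
      List.nil_append]

-- ===== VERDICT (by name: the statement is the Claim_ definition above) =====
theorem get_sum_of_right_sub_arrays_spec : Claim_equal_get_sum_of_right_sub_arrays := by
  intro nums n m _ hpre
  obtain ⟨hn1, hm1, hm2n, hor⟩ := hpre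
  unfold Spec_get_sum_of_right_sub_arrays
  unfold get_sum_of_right_sub_arrays get_sum_of_right_sub_arrays_alt
  set w0 : Int := (PySem.List.slice nums (some (n - m)) (some n)).sum with hw0
  by_cases hmn : n ≤ m
  · -- the loop body never runs: both sides are the single write at index n - m
    rw [PySem.List.pyRange_neg_one_eq_nil (by omega)]
    simp
  · -- 1 ≤ m < n, and hence n ≤ len nums
    have hL : n ≤ (nums.length : Int) := by omega
    set kn : Nat := (n - m).toNat with hkn
    have hk : (kn : Int) = n - m := by omega
    have hm : (0 : Int) ≤ m := by omega
    have hknm : kn + m.toNat = n.toNat := by omega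
    have hknlen : n.toNat ≤ nums.length := by omega
    -- the shared initial array
    have hset : PySem.List.pySetD (List.replicate n.toNat (0 : Int)) (n - m) w0
        = (List.replicate n.toNat (0 : Int)).set kn w0 := by
      rw [← hk, PySem.List.pySetD_natCast]
    -- the initial sum is the prefix-difference at kn
    have hW : w0 = (nums.take (kn + m.toNat)).sum - (nums.take kn).sum := by
      rw [hw0, hknm]
      have hs : PySem.List.slice nums (some (n - m)) (some n)
          = (nums.drop kn).take (n.toNat - kn) := by
        rw [← hk]
        have hn' : (n.toNat : Int) = n := by omega
        rw [← hn', PySem.List.slice_natCast]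
        congr 1
      rw [hs]
      have ht : nums.take n.toNat = nums.take kn ++ (nums.drop kn).take (n.toNat - kn) := by
        have hsplit : n.toNat = kn + (n.toNat - kn) := by omega
        conv_lhs => rw [hsplit, List.take_add]
      rw [ht]; simp
    -- A side
    have hA : ((PySem.List.pyRange (n - m - 1) (-1) (-1)).foldl (stepA nums)
        ((List.replicate n.toNat (0 : Int)).set kn w0, w0, n - 1, w0)).1
        = (trace nums m kn w0 w0).reverse ++ ((List.replicate n.toNat (0 : Int)).set kn w0).drop kn := by
      have h1 : n - m - 1 = (kn : Int) - 1 := by omega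
      have h2 : n - 1 = (kn : Int) + m - 1 := by omega
      rw [h1, h2]
      exact foldl_stepA nums m hm kn _ w0 w0 (by simp; omega)
    -- B side: the prefix fold is prefList nums 0
    have hpfx : nums.foldl (fun p x => p ++ [PySem.List.pyGetD p (-1) 0 + x]) [0]
        = prefList nums 0 := by
      have := foldl_prefList nums [] 0
      simpa using this
    have hB : ((PySem.List.pyRange (n - m - 1) (-1) (-1)).foldl
          (stepB (prefList nums 0) m) ((List.replicate n.toNat (0 : Int)).set kn w0))
        = (traceB (prefList nums 0) m kn w0).reverse
            ++ ((List.replicate n.toNat (0 : Int)).set kn w0).drop kn := by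
      have h1 : n - m - 1 = (kn : Int) - 1 := by omega
      rw [h1]
      refine foldl_stepB (prefList nums 0) m kn _ w0 (by simp; omega) ?_
      simp only [PySem.List.pyGetD_natCast]
      simp [List.getD_eq_getElem?_getD, List.getElem?_set_self (by simp; omega : kn < (List.replicate n.toNat (0:Int)).length)]
    simp only [hset, hpfx, hA, hB]
    rw [hW, trace_eq_traceB nums m hm kn _ (by omega)]
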